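-- pv_equiv track=rewrite | github.com/JuanSebastianGB/Markdown2HTML | markdown2html.py | transform_hashtag
-- ===== SOURCE A (Python) =====
-- def count_hashtags(line_to_check):
--     """Counting # quantity"""
--     line_splited = line_to_check.split('# ')
--     if line_splited.__len__() == 1:
--         return 0
--     return line_to_check.count('#')
--
-- def transform_hashtag(line_to_check):
--     """Transforms the line with # into a line with html tags"""
--     hashtags = ['# ', '## ', '### ', '#### ', '##### ', '###### ']
--     for hashtag in hashtags:
--         if line_to_check.startswith(hashtag):
--             hashtags_quantity = count_hashtags(line_to_check)
--             return '<h{:n}>{}</h{:n}>\n'.\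
--                 format(hashtags_quantity,
--                        line_to_check[hashtags_quantity: -1], hashtags_quantity)
--     return ''
-- ===== SOURCE B (Python) =====
-- def transform_hashtag(line_to_check):
--     """Transforms the line with # into a line with html tags"""
--     k = 0
--     while k < len(line_to_check) and line_to_check[k] == '#':
--         k += 1
--     if 1 <= k <= 6 and k < len(line_to_check) and line_to_check[k] == ' ':
--         n = line_to_check.count('#')
--         return '<h{}>{}</h{}>\n'.format(n, line_to_check[n:-1], n)
--     return ''
-- ===== Notes on version B (the rewrite author's own statement) =====
-- stated objective: simpler
-- what changed: Replaced the loop over six fixed header prefixes (plus the split-based count_hashtags helper) by a single scan that measures the leading run of hash characters and checks the following space, keeping A's whole-line hash count for the tag number.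
import Mathlib
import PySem

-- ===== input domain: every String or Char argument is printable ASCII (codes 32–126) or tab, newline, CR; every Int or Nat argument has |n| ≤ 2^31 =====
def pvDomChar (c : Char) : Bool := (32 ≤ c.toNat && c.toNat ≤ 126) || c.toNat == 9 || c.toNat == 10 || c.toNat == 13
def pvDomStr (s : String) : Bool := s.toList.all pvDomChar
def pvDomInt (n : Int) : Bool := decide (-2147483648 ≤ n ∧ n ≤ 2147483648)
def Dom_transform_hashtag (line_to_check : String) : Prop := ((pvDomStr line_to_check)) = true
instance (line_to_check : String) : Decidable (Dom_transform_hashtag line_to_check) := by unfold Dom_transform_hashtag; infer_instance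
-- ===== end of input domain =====

-- B replaces A's loop over six fixed prefixes (and its split-based helper) by one scan of
-- the leading hash run; objective: simpler. Same return value on every input (both are total).

-- ===== PORT A =====
-- count_hashtags: split on '# ', 0 if one piece, else whole-line '#' count
def count_hashtags (line_to_check : String) : Int :=
  match PySem.Str.split? line_to_check "# " with
  | none => 0   -- unreachable: the separator "# " is nonempty
  | some line_splited =>
    if line_splited.length = 1 then 0
    else (PySem.Str.count line_to_check "#" : Int)

-- the 'for hashtag in hashtags' loop of A
def transform_hashtag_go (hashtags : List String) (line_to_check : String) : String :=
  match hashtags with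
  | [] => ""
  | hashtag :: rest =>
    if PySem.Str.startswith line_to_check hashtag then
      let hashtags_quantity := count_hashtags line_to_check
      "<h" ++ PySem.Int.toStr hashtags_quantity ++ ">" ++
        PySem.Str.slice line_to_check (some hashtags_quantity) (some (-1)) ++
        "</h" ++ PySem.Int.toStr hashtags_quantity ++ ">\n"
    else transform_hashtag_go rest line_to_check

def transform_hashtag (line_to_check : String) : String :=
  transform_hashtag_go ["# ", "## ", "### ", "#### ", "##### ", "###### "] line_to_check

-- ===== PORT B =====
-- the 'while k < len(line) and line[k] == '#'' loop of B: length of the leading '#' run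
def pvHashRun (l : List Char) : Nat :=
  match l with
  | [] => 0
  | c :: t => if c == '#' then pvHashRun t + 1 else 0

def transform_hashtag_alt (line_to_check : String) : String :=
  let l := line_to_check.toList
  let k := pvHashRun l
  if 1 ≤ k ∧ k ≤ 6 ∧ PySem.List.pyGet? l (k : Int) = some ' ' then
    let n : Int := (PySem.Str.count line_to_check "#" : Int)
    "<h" ++ PySem.Int.toStr n ++ ">" ++
      PySem.Str.slice line_to_check (some n) (some (-1)) ++
      "</h" ++ PySem.Int.toStr n ++ ">\n"
  else ""

-- ===== PRECONDITION & SPEC =====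
def Spec_transform_hashtag (line_to_check : String) (out : String) : Prop := out = transform_hashtag_alt line_to_check
instance (line_to_check : String) (out : String) : Decidable (Spec_transform_hashtag line_to_check out) := by unfold Spec_transform_hashtag; infer_instance

-- ===== CLAIM (what is proved, stated in full; the proofs are below) =====
def Claim_equal_transform_hashtag : Prop := ∀ (line_to_check : String), Dom_transform_hashtag line_to_check → Spec_transform_hashtag line_to_check (transform_hashtag line_to_check)

-- ===== LEMMAS AND PROOFS =====

-- '#'^j followed by a space is a prefix of l  ↔  the leading '#' run is exactly j and l[j] = ' '
theorem pvPrefix_hash_iff (j : Nat) (l : List Char) :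
    (List.replicate j '#' ++ [' ']) <+: l ↔ pvHashRun l = j ∧ l[j]? = some ' ' := by
  induction j generalizing l with
  | zero =>
    cases l with
    | nil => simp [pvHashRun]
    | cons c t =>
      simp only [List.replicate, List.nil_append, List.cons_prefix_cons, pvHashRun]
      constructor
      · rintro ⟨rfl, -⟩; simp
      · rintro ⟨h1, h2⟩
        simp only [List.getElem?_cons_zero, Option.some.injEq] at h2
        subst h2; simp
  | succ j ih =>
    cases l with
    | nil => simp [pvHashRun]
    | cons c t =>
      rw [List.replicate_succ, List.cons_append, List.cons_prefix_cons]
      simp only [pvHashRun, List.getElem?_cons_succ]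
      constructor
      · rintro ⟨rfl, hp⟩
        rcases (ih t).1 hp with ⟨h1, h2⟩
        simp [h1, h2]
      · rintro ⟨h1, h2⟩
        by_cases hc : c = '#'
        · subst hc; simp only [beq_self_eq_true, if_true] at h1
          exact ⟨rfl, (ih t).2 ⟨Nat.succ_injective h1, h2⟩⟩
        · simp [hc] at h1

-- splitOn.go returns at least acc.length + 1 pieces
theorem pvGo_len_ge (sep : List Char) (fuel : Nat) (l cur : List Char) (acc : List (List Char)) :
    acc.length + 1 ≤ (PySem.Chars.splitOn.go sep fuel l cur acc).length := by
  induction fuel generalizing l cur acc with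
  | zero => simp [PySem.Chars.splitOn.go]
  | succ fuel ih =>
    cases l with
    | nil => simp [PySem.Chars.splitOn.go]
    | cons c rest =>
      rw [PySem.Chars.splitOn.go]
      split
      · have := ih (List.drop sep.length (c :: rest)) [] (cur.reverse :: acc)
        simp only [List.length_cons] at this
        omega
      · exact ih rest (c :: cur) acc

-- if the separator still occurs in l and the fuel suffices, go returns at least acc.length + 2 pieces
theorem pvGo_len_ge_two (sep : List Char) (hsep : sep ≠ []) (fuel : Nat) (l cur : List Char)
    (acc : List (List Char)) (hin : sep <:+: l) (hf : l.length < fuel) :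
    acc.length + 2 ≤ (PySem.Chars.splitOn.go sep fuel l cur acc).length := by
  induction fuel generalizing l cur acc with
  | zero => omega
  | succ fuel ih =>
    cases l with
    | nil => exact absurd (List.eq_nil_of_infix_nil hin) hsep
    | cons c rest =>
      rw [PySem.Chars.splitOn.go]
      split
      · have := pvGo_len_ge sep fuel (List.drop sep.length (c :: rest)) [] (cur.reverse :: acc)
        simp only [List.length_cons] at this
        omega
      · rename_i hnp
        have hpre : ¬ sep <+: (c :: rest) := fun h => hnp (List.isPrefixOf_iff_prefix.2 h)
        have hr : sep <:+: rest := (List.infix_cons_iff.1 hin).resolve_left hpre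
        have : rest.length < fuel := by
          simp only [List.length_cons] at hf; omega
        exact ih rest (c :: cur) acc hr this

-- when '# ' occurs in the line, count_hashtags is the whole-line '#' count
theorem pvCount_hashtags_eq (line : String) (hin : ['#', ' '] <:+: line.toList) :
    count_hashtags line = (PySem.Str.count line "#" : Int) := by
  unfold count_hashtags
  have hsp : PySem.Str.split? line "# " =
      some ((PySem.Chars.splitOn line.toList ['#', ' ']).map String.ofList) := by
    simp [PySem.Str.split?, PySem.Chars.split?]
  have h2 : 2 ≤ (PySem.Chars.splitOn line.toList ['#', ' ']).length := by
    have := pvGo_len_ge_two ['#', ' '] (by simp) (line.toList.length + 1) line.toList [] []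
      hin (by omega)
    simpa [PySem.Chars.splitOn] using this
  simp [hsp]
  intro h
  omega

-- j ∈ [1,6] prefix test of A, restated through B's run length
theorem pvStartswith_iff (line : String) (j : Nat) (p : String)
    (hp : p.toList = List.replicate j '#' ++ [' ']) :
    PySem.Str.startswith line p = true ↔
      pvHashRun line.toList = j ∧ line.toList[j]? = some ' ' := by
  rw [show PySem.Str.startswith line p = PySem.Chars.startswith line.toList p.toList from rfl,
    PySem.Chars.startswith_iff, hp, pvPrefix_hash_iff]

-- ===== VERDICT (by name: the statement is the Claim_ definition above) =====
theorem transform_hashtag_spec : Claim_equal_transform_hashtag := by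
  intro line _
  unfold Spec_transform_hashtag
  simp only [transform_hashtag, transform_hashtag_go, transform_hashtag_alt]
  by_cases hB : 1 ≤ pvHashRun line.toList ∧ pvHashRun line.toList ≤ 6 ∧
      PySem.List.pyGet? line.toList ((pvHashRun line.toList : Nat) : Int) = some ' '
  · rw [if_pos hB]
    obtain ⟨h1, h6, hsp⟩ := hB
    rw [PySem.List.pyGet?_natCast] at hsp
    obtain ⟨k, hk⟩ : ∃ k, pvHashRun line.toList = k := ⟨_, rfl⟩
    rw [hk] at h1 h6 hsp
    -- every prefix test of A is the question 'is the leading run exactly j?'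
    have hSe : ∀ (j : Nat) (p : String), p.toList = List.replicate j '#' ++ [' '] →
        PySem.Str.startswith line p = decide (pvHashRun line.toList = j) := by
      intro j p hp
      by_cases h : pvHashRun line.toList = j
      · rw [decide_eq_true h]
        exact (pvStartswith_iff line j p hp).2 ⟨h, (hk.symm.trans h) ▸ hsp⟩
      · rw [decide_eq_false h, Bool.eq_false_iff]
        intro htrue
        exact h ((pvStartswith_iff line j p hp).1 htrue).1
    -- the line starts with replicate k '#' ++ ' ', hence contains '# '
    have hpre : (List.replicate k '#' ++ [' ']) <+: line.toList :=
      (pvPrefix_hash_iff k line.toList).2 ⟨hk, hsp⟩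
    have hin : ['#', ' '] <:+: line.toList := by
      rcases hpre with ⟨t, ht⟩
      refine ⟨List.replicate (k - 1) '#', t, ?_⟩
      rw [← ht]
      have hrep : List.replicate k '#' = List.replicate (k - 1) '#' ++ ['#'] := by
        rw [← List.replicate_succ']
        congr 1
        omega
      rw [hrep]
      simp
    have hcnt := pvCount_hashtags_eq line hin
    rw [hSe 1 "# " (by decide), hSe 2 "## " (by decide), hSe 3 "### " (by decide),
      hSe 4 "#### " (by decide), hSe 5 "##### " (by decide), hSe 6 "###### " (by decide)]
    simp only [hk]
    interval_cases k <;> simp [hcnt]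
  · rw [if_neg hB]
    have hno : ∀ (j : Nat) (p : String), p.toList = List.replicate j '#' ++ [' '] →
        1 ≤ j → j ≤ 6 → PySem.Str.startswith line p = false := by
      intro j p hp hj1 hj6
      rw [Bool.eq_false_iff]
      intro htrue
      rcases (pvStartswith_iff line j p hp).1 htrue with ⟨hrun, hat⟩
      exact hB ⟨by omega, by omega, by rw [PySem.List.pyGet?_natCast, hrun]; exact hat⟩
    rw [hno 1 "# " (by decide) (by omega) (by omega),
      hno 2 "## " (by decide) (by omega) (by omega),
      hno 3 "### " (by decide) (by omega) (by omega),
      hno 4 "#### " (by decide) (by omega) (by omega),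
      hno 5 "##### " (by decide) (by omega) (by omega),
      hno 6 "###### " (by decide) (by omega) (by omega)]
    simp
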